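-- pv_equiv track=rewrite | github.com/tnakaicode/jburkardt-python | mcnuggets/mcnuggets.py | mcnugget_solvable
-- ===== SOURCE A (Python) =====
-- def mcnugget_solvable ( a, b ):
--
-- #*****************************************************************************80
-- #
-- ## mcnugget_solvable() determines whether a McNuggets problem is solvable.
-- #
-- #  Discussion:
-- #
-- #     We are given a Diophantine equation
-- #
-- #       a1 x1 + a2 x2 + ... + an * xn = b
-- #
-- #     for which the coefficients a are positive integers, and
-- #     the right hand side b is a nonnegative integer.
-- #
-- #     We want to know whether there are nonnegative integers x which
-- #     satisfy this equation.  If so, we say the value b is "solvable".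
-- #
-- #     In particular, we might have a = [ 6, 9, 20 ] and b would be
-- #     the desired number of Chicken McNuggets.
-- #
-- #  Licensing:
-- #
-- #    This code is distributed under the MIT license.
-- #
-- #  Modified:
-- #
-- #    12 October 2022
-- #
-- #  Author:
-- #
-- #    John Burkardt
-- #
-- #  Reference:
-- #
-- #    Scott Chapman, Chris O’Neill,
-- #    Factoring in the Chicken McNugget Monoid,
-- #    Mathematics Magazine,
-- #    Volume 91, Number 5, 2018, pages 323-336.
-- #
-- #  Input:
-- #
-- #    integer a(n): the number of McNuggets in each package size.
-- #
-- #    integer b: the total number of McNuggets desired.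
-- #
-- #  Output:
-- #
-- #    boolean solvable: true if there is a solution.
-- #
--   a_num = len ( a )
--   solvable = False
-- #
-- #  Check whether b is immediately solvable.
-- #
--   if ( b == 0 ) :
--     solvable = True
--     return solvable
--
--   for i in range ( 0, a_num ):
--     if ( ( b % a[i] ) == 0 ):
--       solvable = True
--       return solvable
-- #
-- #  Initially, the set "item" contains "b".
-- #
--   item = { b }
--   item_num = 1
-- #
-- #  Loop on largest "descendant" of b.
-- #
--   while ( 0 < item_num ):
--
-- #   n = item[-1]
--     n = max ( item )
--     item.remove ( n )
--     item_num = item_num - 1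
--
--     for i in range ( 0, a_num ):
--
--       n_minus_a = n - a[i]
--
--       if ( n_minus_a == 0 ):
--         solvable = True
--         return solvable
--
--       if ( 0 <= n_minus_a ):
--
--         for j in range ( 0, a_num ):
--           if ( ( n_minus_a % a[j] ) == 0 ):
--             solvable = True
--             return solvable
-- #
-- #  Add n_minus_a to set.
-- #  Since it might already be a member, we use len() to update the set size.
-- #
--         item.add ( n_minus_a )
--         item_num = len ( item )
--
--   return solvable
-- ===== SOURCE B (Python) =====
-- def mcnugget_solvable(a, b):
--     if b < 0:
--         return False
--     if b == 0:
--         return True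
--     seen = {0}
--     stack = [0]
--     while stack:
--         s = stack.pop()
--         for x in a:
--             if (b - s) % x == 0:
--                 return True
--             t = s + x
--             if t <= b and t not in seen:
--                 seen.add(t)
--                 stack.append(t)
--     return False
-- ===== Notes on version B (the rewrite author's own statement) =====
-- stated objective: alternative
-- what changed: A searches downward from b with a max-extraction worklist set and per-node divisibility scan; B searches upward from 0 over a visited-set + stack (no max extraction, O(1) set ops), with the same divisibility shortcut.
-- intended difference: On b < 0 with some package size dividing b, A returns True (its 'b % a[i] == 0' shortcut fires on a negative target) while B returns False, which is intended: no nonnegative combination of positive sizes is negative. — e.g. on mcnugget_solvable([6], -6): A returns true, B returns false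
-- outside the precondition, e.g. on mcnugget_solvable([-3, 2], 7): A returns True, B returns True
import Mathlib
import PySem

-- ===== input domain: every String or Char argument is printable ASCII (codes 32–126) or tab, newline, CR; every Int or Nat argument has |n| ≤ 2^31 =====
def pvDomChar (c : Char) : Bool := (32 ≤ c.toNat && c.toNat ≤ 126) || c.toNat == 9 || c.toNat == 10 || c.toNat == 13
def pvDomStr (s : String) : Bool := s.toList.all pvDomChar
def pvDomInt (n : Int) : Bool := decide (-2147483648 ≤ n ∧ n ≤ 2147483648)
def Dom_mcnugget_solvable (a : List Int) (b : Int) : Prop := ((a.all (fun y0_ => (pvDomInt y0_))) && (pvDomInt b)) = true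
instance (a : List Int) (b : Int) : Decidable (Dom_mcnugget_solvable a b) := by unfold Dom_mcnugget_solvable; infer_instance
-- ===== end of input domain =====

-- B replaces A's max-first downward worklist search (max-extraction set) by an upward search
-- from 0 with a visited set and stack; agreement is proved on Pre_, outside the stated D_
-- region (negative b with a dividing size, where A's shortcut misfires), return values only.

-- ===== PORT A =====
-- inner 'for j' loop: 'if n_minus_a % a[j] == 0: return True'
def pvCheckDiv (a : List Int) (m : Int) : Bool :=
  a.any (fun y => PySem.Int.mod m y == 0)

-- outer 'for i' loop of the while body; 'none' = an early 'return True' fired,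
-- 'some item' = loop finished with this worklist set
def pvAStep (a : List Int) (xs : List Int) (n : Int) (item : PySem.Set Int) :
    Option (PySem.Set Int) :=
  match xs with
  | [] => some item
  | x :: rest =>
    let m := n - x
    if m = 0 then none
    else if 0 ≤ m then
      if pvCheckDiv a m then none
      else pvAStep a rest n (PySem.Set.add item m)
    else pvAStep a rest n item

-- the 'while 0 < item_num' loop; fuel is a totality guard only (Python has no bound);
-- under Pre_ the maxima strictly decrease, so fuel b.toNat + 1 is provably sufficient
def pvALoop (a : List Int) : Nat → PySem.Set Int → Bool
  | 0, _ => false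
  | fuel + 1, item =>
    if item.length = 0 then false
    else
      let n := (PySem.List.max? item (fun x => x)).getD 0
      match PySem.Set.remove? item n with
      | none => false   -- Python KeyError; unreachable, n = max item ∈ item
      | some item' =>
        match pvAStep a a n item' with
        | none => true
        | some item'' => pvALoop a fuel item''

def mcnugget_solvable (a : List Int) (b : Int) : Bool :=
  if b = 0 then true
  else if a.any (fun x => PySem.Int.mod b x == 0) then true
  else pvALoop a (b.toNat + 1) (PySem.Set.ofList [b])

-- ===== PORT B =====
-- upward search from 0: 'for x in a' body; 'none' = 'return True' fired,
-- 'some (seen, stack)' = inner loop done.  Lean list head = Python list END (append/pop() are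
-- cons/head here, the same LIFO order).
def pvBStep (a xs : List Int) (s b : Int) (seen : PySem.Set Int) (stack : List Int) :
    Option (PySem.Set Int × List Int) :=
  match xs with
  | [] => some (seen, stack)
  | x :: rest =>
    if PySem.Int.mod (b - s) x == 0 then none
    else
      let t := s + x
      if t ≤ b ∧ ¬ t ∈ seen then
        pvBStep a rest s b (PySem.Set.add seen t) (t :: stack)
      else
        pvBStep a rest s b seen stack

-- the 'while stack' loop; fuel is a totality guard only (under Pre_ the measure
-- |stack| + (b.toNat + 1 - |seen|) strictly decreases, so fuel b.toNat + 2 is provably enough)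
def pvBLoop (a : List Int) (b : Int) : Nat → PySem.Set Int → List Int → Bool
  | 0, _, _ => false
  | fuel + 1, seen, stack =>
    match stack with
    | [] => false
    | s :: rest =>
      match pvBStep a a s b seen rest with
      | none => true
      | some (seen', stack') => pvBLoop a b fuel seen' stack'

def mcnugget_solvable_alt (a : List Int) (b : Int) : Bool :=
  if b < 0 then false
  else if b = 0 then true
  else pvBLoop a b (b.toNat + 2) (PySem.Set.ofList [0]) [0]

-- ===== PRECONDITION & SPEC =====
-- Pre_ keeps: b = 0 (answered before any size is used), positive package sizes, and lists
-- whose zero-free prefix contains a divisor of b (answered by the immediate divisibility scan,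
-- for every b).  Excluded are only the remaining nonpositive-size lists, on which A raises
-- ZeroDivisionError (a size 0 is reached) or can loop forever (a negative size).
def Pre_mcnugget_solvable (a : List Int) (b : Int) : Prop :=
  b = 0 ∨ (∀ x ∈ a, 1 ≤ x) ∨ (∃ x ∈ a.takeWhile (fun y => y != 0), x ∣ b)
instance (a : List Int) (b : Int) : Decidable (Pre_mcnugget_solvable a b) := by
  unfold Pre_mcnugget_solvable; infer_instance

def pvWitness_mcnugget_solvable : List Int × Int := ([6, 9, 20], 11)

-- On b < 0 with some package size dividing b, A returns True (its b % a[i] == 0 shortcut fires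
-- on a negative target), B returns False; B is intended: no nonnegative combination of positive
-- sizes is negative.
def D_mcnugget_solvable (a : List Int) (b : Int) : Prop :=
  b < 0 ∧ ∃ x ∈ a, x ∣ b
instance (a : List Int) (b : Int) : Decidable (D_mcnugget_solvable a b) := by
  unfold D_mcnugget_solvable; infer_instance

def Spec_mcnugget_solvable (a : List Int) (b : Int) (out : Bool) : Prop := ¬ D_mcnugget_solvable a b → out = mcnugget_solvable_alt a b
instance (a : List Int) (b : Int) (out : Bool) : Decidable (Spec_mcnugget_solvable a b out) := by
  unfold Spec_mcnugget_solvable; infer_instance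

def pvDiffWitness_mcnugget_solvable : List Int × Int := ([6], -6)
def pvDiffWitnessOut_mcnugget_solvable : Bool × Bool := (true, false)

-- ===== CLAIM (what is proved, stated in full; the proofs are below) =====
def Claim_unchanged_mcnugget_solvable : Prop := ∀ (a : List Int) (b : Int), Dom_mcnugget_solvable a b → Pre_mcnugget_solvable a b → Spec_mcnugget_solvable a b (mcnugget_solvable a b)
def Claim_changed_mcnugget_solvable : Prop := Dom_mcnugget_solvable (pvDiffWitness_mcnugget_solvable.1) (pvDiffWitness_mcnugget_solvable.2) ∧ Pre_mcnugget_solvable (pvDiffWitness_mcnugget_solvable.1) (pvDiffWitness_mcnugget_solvable.2) ∧ D_mcnugget_solvable (pvDiffWitness_mcnugget_solvable.1) (pvDiffWitness_mcnugget_solvable.2) ∧ mcnugget_solvable (pvDiffWitness_mcnugget_solvable.1) (pvDiffWitness_mcnugget_solvable.2) = pvDiffWitnessOut_mcnugget_solvable.1 ∧ mcnugget_solvable_alt (pvDiffWitness_mcnugget_solvable.1) (pvDiffWitness_mcnugget_solvable.2) = pvDiffWitnessOut_mcnugget_solvable.2 ∧ pvDiffWitnessOut_mcnugget_solvable.1 ≠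 pvDiffWitnessOut_mcnugget_solvable.2
def Claim_exact_mcnugget_solvable : Prop := ∀ (a : List Int) (b : Int), Dom_mcnugget_solvable a b → Pre_mcnugget_solvable a b → D_mcnugget_solvable a b → mcnugget_solvable a b ≠ mcnugget_solvable_alt a b

-- ===== LEMMAS AND PROOFS =====

-- n is a nonnegative integer combination of the package sizes (the value both programs decide)
inductive NRep (a : List Int) : Int → Prop
  | zero : NRep a 0
  | step {n x : Int} (hx : x ∈ a) (h : NRep a (n - x)) : NRep a n

theorem NRep_nonneg {a : List Int} (ha : ∀ x ∈ a, 1 ≤ x) {n : Int} (h : NRep a n) : 0 ≤ n := by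
  induction h with
  | zero => exact le_refl 0
  | step hx _ ih => have := ha _ hx; omega

theorem NRep_mul {a : List Int} {x : Int} (hx : x ∈ a) (k : Nat) : NRep a (x * k) := by
  induction k with
  | zero => simpa using NRep.zero
  | succ k ih =>
    have h : x * ((k : Int) + 1) - x = x * k := by ring
    exact NRep.step hx (by push_cast; rw [h]; exact ih)

theorem NRep_of_dvd {a : List Int} (ha : ∀ x ∈ a, 1 ≤ x) {x m : Int}
    (hx : x ∈ a) (hd : x ∣ m) (hm : 0 ≤ m) : NRep a m := by
  have hx1 : 1 ≤ x := ha _ hx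
  obtain ⟨k, rfl⟩ := hd
  have hk : 0 ≤ k := by nlinarith
  have hkn : x * k = x * (k.toNat : Int) := by rw [Int.toNat_of_nonneg hk]
  rw [hkn]; exact NRep_mul hx k.toNat

theorem NRep_char {a : List Int} (ha : ∀ x ∈ a, 1 ≤ x) {v : Int} (hv : 1 ≤ v) :
    NRep a v ↔ ∃ x ∈ a, x ≤ v ∧ NRep a (v - x) := by
  constructor
  · intro h
    cases h with
    | zero => omega
    | step hx h' =>
      exact ⟨_, hx, by have := NRep_nonneg ha h'; omega, h'⟩
  · rintro ⟨x, hx, _, h⟩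
    exact NRep.step hx h

theorem pvCheckDiv_iff (a : List Int) (m : Int) :
    pvCheckDiv a m = true ↔ ∃ y ∈ a, y ∣ m := by
  simp [pvCheckDiv, PySem.Int.mod_eq_zero_iff_dvd]

theorem pvAStep_none_iff (a xs : List Int) (n : Int) (item : PySem.Set Int) :
    pvAStep a xs n item = none ↔
      ∃ x ∈ xs, n - x = 0 ∨ (0 ≤ n - x ∧ pvCheckDiv a (n - x) = true) := by
  induction xs generalizing item with
  | nil => simp [pvAStep]
  | cons x rest ih =>
    simp only [pvAStep]
    split_ifs with h0 hge hdiv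
    · simp_all
    · simp only [true_iff]
      exact ⟨x, by simp, Or.inr ⟨hge, hdiv⟩⟩
    · rw [ih]
      constructor
      · rintro ⟨z, hz, hp⟩; exact ⟨z, by simp [hz], hp⟩
      · rintro ⟨z, hz, hp⟩
        rcases List.mem_cons.mp hz with rfl | hz
        · exact absurd hp (by simp_all)
        · exact ⟨z, hz, hp⟩
    · rw [ih]
      constructor
      · rintro ⟨z, hz, hp⟩; exact ⟨z, by simp [hz], hp⟩
      · rintro ⟨z, hz, hp⟩
        rcases List.mem_cons.mp hz with rfl | hz
        · exact absurd hp (by omega)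
        · exact ⟨z, hz, hp⟩

theorem pvAStep_some_mem (a xs : List Int) (n : Int) (item item' : PySem.Set Int)
    (h : pvAStep a xs n item = some item') (y : Int) :
    y ∈ item' ↔ y ∈ item ∨ ∃ x ∈ xs, y = n - x ∧ 1 ≤ n - x := by
  induction xs generalizing item with
  | nil => simp only [pvAStep, Option.some.injEq] at h; subst h; simp
  | cons x rest ih =>
    simp only [pvAStep] at h
    split_ifs at h with h0 hge hdiv
    · rw [ih _ h, PySem.Set.mem_add]
      constructor
      · rintro ((hy | rfl) | ⟨z, hz, hp⟩)
        · exact Or.inl hy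
        · exact Or.inr ⟨x, by simp, rfl, by omega⟩
        · exact Or.inr ⟨z, by simp [hz], hp⟩
      · rintro (hy | ⟨z, hz, rfl, hp⟩)
        · exact Or.inl (Or.inl hy)
        · rcases List.mem_cons.mp hz with rfl | hz
          · exact Or.inl (Or.inr rfl)
          · exact Or.inr ⟨z, hz, rfl, hp⟩
    · rw [ih _ h]
      constructor
      · rintro (hy | ⟨z, hz, hp⟩)
        · exact Or.inl hy
        · exact Or.inr ⟨z, by simp [hz], hp⟩
      · rintro (hy | ⟨z, hz, rfl, hp⟩)
        · exact Or.inl hy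
        · rcases List.mem_cons.mp hz with rfl | hz
          · omega
          · exact Or.inr ⟨z, hz, rfl, hp⟩

theorem pvAStep_some_nodup (a xs : List Int) (n : Int) (item item' : PySem.Set Int)
    (h : pvAStep a xs n item = some item') (hn : item.Nodup) : item'.Nodup := by
  induction xs generalizing item with
  | nil => simp only [pvAStep, Option.some.injEq] at h; subst h; exact hn
  | cons x rest ih =>
    simp only [pvAStep] at h
    split_ifs at h
    · exact ih _ h (PySem.Set.nodup_add _ _ hn)
    · exact ih _ h hn

theorem pvALoop_iff (a : List Int) (ha : ∀ x ∈ a, 1 ≤ x) :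
    ∀ (fuel : Nat) (item : PySem.Set Int), item.Nodup →
      (∀ m ∈ item, 1 ≤ m) → (∀ m ∈ item, m.toNat < fuel) →
      (pvALoop a fuel item = true ↔ ∃ m ∈ item, NRep a m) := by
  intro fuel
  induction fuel with
  | zero =>
    intro item hnd h1 hf
    simp only [pvALoop, Bool.false_eq_true, false_iff]
    rintro ⟨m, hm, -⟩
    exact absurd (hf m hm) (by omega)
  | succ fuel ih =>
    intro item hnd h1 hf
    by_cases hemp : item.length = 0
    · have hnil : item = [] := List.length_eq_zero_iff.mp hemp
      subst hnil
      simp [pvALoop]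
    · obtain ⟨n, hmax⟩ : ∃ n, PySem.List.max? item (fun x => x) = some n := by
        cases hx : PySem.List.max? item (fun x => x) with
        | none =>
          exact absurd ((PySem.List.max?_eq_none_iff _ _).mp hx)
            (fun h => hemp (by simp [h]))
        | some n => exact ⟨n, rfl⟩
      have hnI : n ∈ item := PySem.List.max?_mem hmax
      have hmaxy : ∀ y ∈ item, y ≤ n := PySem.List.max?_isMax hmax
      have hn1 : 1 ≤ n := h1 n hnI
      simp only [pvALoop, if_neg hemp, hmax, Option.getD_some,
        PySem.Set.remove?_of_mem hnI]
      cases hstep : pvAStep a a n (PySem.Set.discard item n) with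
      | none =>
        simp only [true_iff]
        obtain ⟨x, hx, hcase⟩ := (pvAStep_none_iff a a n _).mp hstep
        refine ⟨n, hnI, ?_⟩
        rcases hcase with h0 | ⟨hge, hdiv⟩
        · exact NRep.step hx (h0 ▸ NRep.zero)
        · obtain ⟨y, hy, hyd⟩ := (pvCheckDiv_iff a (n - x)).mp hdiv
          exact NRep.step hx (NRep_of_dvd ha hy hyd hge)
      | some item'' =>
        have hmem := pvAStep_some_mem a a n _ item'' hstep
        have hnd'' : item''.Nodup :=
          pvAStep_some_nodup a a n _ item'' hstep (PySem.Set.nodup_discard _ _ hnd)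
        have h1'' : ∀ m ∈ item'', 1 ≤ m := by
          intro m hm
          rcases (hmem m).mp hm with hm' | ⟨x, -, rfl, hx1⟩
          · exact h1 m ((PySem.Set.mem_discard _ _ _).mp hm').1
          · exact hx1
        have hfn : n.toNat < fuel + 1 := hf n hnI
        have hf'' : ∀ m ∈ item'', m.toNat < fuel := by
          intro m hm
          rcases (hmem m).mp hm with hm' | ⟨x, hx, rfl, hx1⟩
          · obtain ⟨hmi, hne⟩ := (PySem.Set.mem_discard _ _ _).mp hm'
            have := hmaxy m hmi
            have := h1 m hmi
            omega
          · have := ha x hx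
            omega
        rw [ih item'' hnd'' h1'' hf'']
        constructor
        · rintro ⟨m, hm, hrep⟩
          rcases (hmem m).mp hm with hm' | ⟨x, hx, rfl, hx1⟩
          · exact ⟨m, ((PySem.Set.mem_discard _ _ _).mp hm').1, hrep⟩
          · exact ⟨n, hnI, NRep.step hx hrep⟩
        · rintro ⟨m, hm, hrep⟩
          by_cases hmn : m = n
          · subst hmn
            obtain ⟨x, hx, hxle, hrep'⟩ := (NRep_char ha hn1).mp hrep
            have hge : 0 ≤ m - x := NRep_nonneg ha hrep'
            by_cases h0 : m - x = 0
            · exact absurd hstep (by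
                rw [(pvAStep_none_iff a a m _).mpr ⟨x, hx, Or.inl h0⟩]
                simp)
            · exact ⟨m - x, (hmem (m - x)).mpr (Or.inr ⟨x, hx, rfl, by omega⟩), hrep'⟩
          · exact ⟨m, (hmem m).mpr
              (Or.inl ((PySem.Set.mem_discard _ _ _).mpr ⟨hm, hmn⟩)), hrep⟩

theorem pvAStep_skip (a xs : List Int) (b : Int) (item : PySem.Set Int)
    (hxs : ∀ x ∈ xs, 1 ≤ x) (hb : b < 0) : pvAStep a xs b item = some item := by
  induction xs with
  | nil => rfl
  | cons x rest ih =>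
    have hx : 1 ≤ x := hxs x (by simp)
    simp only [pvAStep]
    rw [if_neg (by omega), if_neg (by omega)]
    exact ih (fun y hy => hxs y (by simp [hy]))

theorem NRep_add_mul {a : List Int} {s x : Int} (hs : NRep a s) (hx : x ∈ a) (k : Nat) :
    NRep a (s + x * k) := by
  induction k with
  | zero => simpa using hs
  | succ k ih =>
    have h : s + x * ((k : Int) + 1) - x = s + x * k := by ring
    exact NRep.step hx (by push_cast; rw [h]; exact ih)

theorem NRep_add_dvd {a : List Int} (ha : ∀ x ∈ a, 1 ≤ x) {s x r : Int}
    (hs : NRep a s) (hx : x ∈ a) (hd : x ∣ r) (hr : 0 ≤ r) : NRep a (s + r) := by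
  have hx1 : 1 ≤ x := ha _ hx
  obtain ⟨k, rfl⟩ := hd
  have hk : 0 ≤ k := by nlinarith
  have hkn : x * k = x * (k.toNat : Int) := by rw [Int.toNat_of_nonneg hk]
  rw [hkn]; exact NRep_add_mul hs hx k.toNat

theorem nodup_length_le (b : Int) (hb : 0 ≤ b) (l : List Int) (hnd : l.Nodup)
    (hmem : ∀ t ∈ l, 0 ≤ t ∧ t ≤ b) : l.length ≤ b.toNat + 1 := by
  have hsub : l.toFinset ⊆ Finset.Icc 0 b := by
    intro t ht
    rw [List.mem_toFinset] at ht
    exact Finset.mem_Icc.mpr ⟨(hmem t ht).1, (hmem t ht).2⟩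
  have hcard := Finset.card_le_card hsub
  rw [List.toFinset_card_of_nodup hnd, Int.card_Icc] at hcard
  omega

theorem pvBStep_none_iff (a : List Int) (s b : Int) :
    ∀ (xs : List Int) (seen : PySem.Set Int) (stack : List Int),
      pvBStep a xs s b seen stack = none ↔ ∃ x ∈ xs, PySem.Int.mod (b - s) x = 0 := by
  intro xs
  induction xs with
  | nil => intro seen stack; simp [pvBStep]
  | cons x rest ih =>
    intro seen stack
    simp only [pvBStep]
    split_ifs with hm hg
    · rw [beq_iff_eq] at hm
      simp [hm]
    · rw [ih]
      rw [beq_iff_eq] at hm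
      constructor
      · rintro ⟨z, hz, hp⟩; exact ⟨z, by simp [hz], hp⟩
      · rintro ⟨z, hz, hp⟩
        rcases List.mem_cons.mp hz with rfl | hz
        · exact absurd hp hm
        · exact ⟨z, hz, hp⟩
    · rw [ih]
      rw [beq_iff_eq] at hm
      constructor
      · rintro ⟨z, hz, hp⟩; exact ⟨z, by simp [hz], hp⟩
      · rintro ⟨z, hz, hp⟩
        rcases List.mem_cons.mp hz with rfl | hz
        · exact absurd hp hm
        · exact ⟨z, hz, hp⟩

theorem pvBStep_some_facts (a : List Int) (s b : Int) :
    ∀ (xs : List Int) (seen : PySem.Set Int) (stack : List Int)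
      (seen' : PySem.Set Int) (stack' : List Int),
      pvBStep a xs s b seen stack = some (seen', stack') →
      (∀ y, y ∈ seen' ↔ y ∈ seen ∨ ∃ x ∈ xs, y = s + x ∧ y ≤ b) ∧
      (∀ y ∈ stack, y ∈ stack') ∧
      (∀ y ∈ stack', y ∈ stack ∨ ∃ x ∈ xs, y = s + x ∧ y ≤ b) ∧
      (∀ y, y ∈ seen' → y ∉ seen → y ∈ stack') ∧
      stack'.length + seen.length = stack.length + seen'.length ∧
      (seen.Nodup → seen'.Nodup) := by
  intro xs
  induction xs with
  | nil =>
    intro seen stack seen' stack' h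
    simp only [pvBStep, Option.some.injEq, Prod.mk.injEq] at h
    obtain ⟨rfl, rfl⟩ := h
    exact ⟨by simp, fun y hy => hy, fun y hy => Or.inl hy, fun y hy hyn => absurd hy hyn, by omega, fun h => h⟩
  | cons x rest ih =>
    intro seen stack seen' stack' h
    simp only [pvBStep] at h
    split_ifs at h with hm hg
    · obtain ⟨hmem, hstk, hstk2, hnew, hlen, hnd⟩ := ih _ _ _ _ h
      refine ⟨?_, ?_, ?_, ?_, ?_, ?_⟩
      · intro y
        rw [hmem y, PySem.Set.mem_add]
        constructor
        · rintro ((hy | rfl) | ⟨z, hz, rfl, hyb⟩)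
          · exact Or.inl hy
          · exact Or.inr ⟨x, by simp, rfl, hg.1⟩
          · exact Or.inr ⟨z, by simp [hz], rfl, hyb⟩
        · rintro (hy | ⟨z, hz, rfl, hyb⟩)
          · exact Or.inl (Or.inl hy)
          · rcases List.mem_cons.mp hz with rfl | hz
            · exact Or.inl (Or.inr rfl)
            · exact Or.inr ⟨z, hz, rfl, hyb⟩
      · intro y hy; exact hstk y (by simp [hy])
      · intro y hy
        rcases hstk2 y hy with hy' | ⟨z, hz, rfl, hzb⟩
        · rcases List.mem_cons.mp hy' with rfl | hy''
          · exact Or.inr ⟨x, by simp, rfl, hg.1⟩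
          · exact Or.inl hy''
        · exact Or.inr ⟨z, by simp [hz], rfl, hzb⟩
      · intro y hy hyn
        by_cases hy1 : y ∈ PySem.Set.add seen (s + x)
        · rcases (PySem.Set.mem_add _ _ _).mp hy1 with hy2 | rfl
          · exact absurd hy2 hyn
          · exact hstk _ (by simp)
        · exact hnew y hy hy1
      · rw [PySem.Set.add_of_not_mem hg.2] at hlen
        simp only [List.length_append, List.length_cons, List.length_nil] at hlen ⊢
        omega
      · intro hnd0
        exact hnd (PySem.Set.nodup_add _ _ hnd0)
    · obtain ⟨hmem, hstk, hstk2, hnew, hlen, hnd⟩ := ih _ _ _ _ h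
      push Not at hg
      refine ⟨?_, hstk, ?_, hnew, hlen, hnd⟩
      · intro y
        rw [hmem y]
        constructor
        · rintro (hy | ⟨z, hz, rfl, hyb⟩)
          · exact Or.inl hy
          · exact Or.inr ⟨z, by simp [hz], rfl, hyb⟩
        · rintro (hy | ⟨z, hz, rfl, hyb⟩)
          · exact Or.inl hy
          · rcases List.mem_cons.mp hz with rfl | hz
            · exact Or.inl (hg hyb)
            · exact Or.inr ⟨z, hz, rfl, hyb⟩
      · intro y hy
        rcases hstk2 y hy with hy' | ⟨z, hz, rfl, hzb⟩
        · exact Or.inl hy'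
        · exact Or.inr ⟨z, by simp [hz], rfl, hzb⟩

theorem pvBLoop_true (a : List Int) (ha : ∀ x ∈ a, 1 ≤ x) (b : Int) :
    ∀ (fuel : Nat) (seen : PySem.Set Int) (stack : List Int),
      (∀ t ∈ stack, NRep a t ∧ 0 ≤ t ∧ t ≤ b) →
      pvBLoop a b fuel seen stack = true → NRep a b := by
  intro fuel
  induction fuel with
  | zero => intro seen stack _ h; simp [pvBLoop] at h
  | succ fuel ih =>
    intro seen stack hstk h
    cases stack with
    | nil => simp [pvBLoop] at h
    | cons s rest =>
      obtain ⟨hrs, hs0, hsb⟩ := hstk s (by simp)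
      simp only [pvBLoop] at h
      cases hstep : pvBStep a a s b seen rest with
      | none =>
        obtain ⟨x, hx, hmod⟩ := (pvBStep_none_iff a s b a seen rest).mp hstep
        rw [PySem.Int.mod_eq_zero_iff_dvd] at hmod
        have : NRep a (s + (b - s)) := NRep_add_dvd ha hrs hx hmod (by omega)
        simpa using this
      | some p =>
        obtain ⟨seen', stack'⟩ := p
        rw [hstep] at h
        obtain ⟨-, -, hstk2, -, -, -⟩ := pvBStep_some_facts a s b a seen rest seen' stack' hstep
        refine ih seen' stack' ?_ h
        intro t ht
        rcases hstk2 t ht with ht' | ⟨z, hz, rfl, hzb⟩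
        · exact hstk t (by simp [ht'])
        · have hz1 := ha z hz
          refine ⟨NRep.step hz ?_, by omega, hzb⟩
          have he : s + z - z = s := by ring
          rw [he]; exact hrs

theorem closed_not_NRep (a : List Int) (ha : ∀ x ∈ a, 1 ≤ x) (b : Int) (hb : 1 ≤ b)
    (seen : PySem.Set Int) (h0 : (0 : Int) ∈ seen)
    (hC : ∀ t ∈ seen, ∀ x ∈ a, ¬ x ∣ (b - t) ∧ (t + x ≤ b → t + x ∈ seen)) :
    ¬ NRep a b := by
  intro hrep
  have key : ∀ t : Int, NRep a t → t ≤ b → t ∈ seen := by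
    intro t ht
    induction ht with
    | zero => intro _; exact h0
    | step hx h ihx =>
      rename_i n x
      intro hnb
      have hx1 : 1 ≤ x := ha _ hx
      have hge : 0 ≤ n - x := NRep_nonneg ha h
      have hmem : n - x ∈ seen := ihx (by omega)
      have := (hC (n - x) hmem x hx).2 (by omega)
      simpa using this
  have hbseen : b ∈ seen := key b hrep le_rfl
  cases hrep with
  | zero => omega
  | step hx h =>
    rename_i x
    exact (hC b hbseen x hx).1 (by simp)

theorem pvBLoop_false (a : List Int) (ha : ∀ x ∈ a, 1 ≤ x) (b : Int) (hb : 1 ≤ b) :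
    ∀ (fuel : Nat) (seen : PySem.Set Int) (stack : List Int),
      seen.Nodup →
      (∀ t ∈ stack, t ∈ seen) →
      (∀ t ∈ seen, NRep a t ∧ 0 ≤ t ∧ t ≤ b) →
      (0 : Int) ∈ seen →
      (∀ t ∈ seen, t ∉ stack → ∀ x ∈ a, ¬ x ∣ (b - t) ∧ (t + x ≤ b → t + x ∈ seen)) →
      stack.length + (b.toNat + 1 - seen.length) < fuel →
      pvBLoop a b fuel seen stack = false → ¬ NRep a b := by
  intro fuel
  induction fuel with
  | zero =>
    intro seen stack hnd hsub hrep h0 hP hfuel h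
    omega
  | succ fuel ih =>
    intro seen stack hnd hsub hrep h0 hP hfuel h
    cases stack with
    | nil =>
      refine closed_not_NRep a ha b hb seen h0 ?_
      intro t ht x hx
      exact hP t ht (by simp) x hx
    | cons s rest =>
      simp only [pvBLoop] at h
      cases hstep : pvBStep a a s b seen rest with
      | none => rw [hstep] at h; simp at h
      | some p =>
        obtain ⟨seen', stack'⟩ := p
        rw [hstep] at h
        obtain ⟨hmem, hstk, hstk2, hnew, hlen, hndf⟩ :=
          pvBStep_some_facts a s b a seen rest seen' stack' hstep
        have hsI : s ∈ seen := hsub s (by simp)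
        have hnone : ∀ x ∈ a, ¬ PySem.Int.mod (b - s) x = 0 := by
          intro x hx hmod
          have hn := (pvBStep_none_iff a s b a seen rest).mpr ⟨x, hx, hmod⟩
          rw [hn] at hstep
          cases hstep
        have hrep' : ∀ t ∈ seen', NRep a t ∧ 0 ≤ t ∧ t ≤ b := by
          intro t ht
          rcases (hmem t).mp ht with ht' | ⟨z, hz, rfl, hzb⟩
          · exact hrep t ht'
          · obtain ⟨hrs, hs0, -⟩ := hrep s hsI
            have hz1 := ha z hz
            refine ⟨NRep.step hz ?_, by omega, hzb⟩
            have he : s + z - z = s := by ring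
            rw [he]; exact hrs
        refine ih seen' stack' (hndf hnd) ?_ hrep' ((hmem 0).mpr (Or.inl h0)) ?_ ?_ h
        · intro y hy
          rcases hstk2 y hy with hy' | ⟨z, hz, rfl, hzb⟩
          · exact (hmem y).mpr (Or.inl (hsub y (by simp [hy'])))
          · exact (hmem _).mpr (Or.inr ⟨z, hz, rfl, hzb⟩)
        · intro t ht hnstk x hx
          by_cases htseen : t ∈ seen
          · by_cases hts : t = s
            · subst hts
              constructor
              · rw [← PySem.Int.mod_eq_zero_iff_dvd]
                exact hnone x hx
              · intro hle
                exact (hmem _).mpr (Or.inr ⟨x, hx, rfl, hle⟩)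
            · by_cases htr : t ∈ rest
              · exact absurd (hstk t htr) hnstk
              · have hold := hP t htseen (by simp [hts, htr]) x hx
                exact ⟨hold.1, fun hle => (hmem _).mpr (Or.inl (hold.2 hle))⟩
          · exact absurd (hnew t ht htseen) hnstk
        · have hK : seen.length ≤ b.toNat + 1 :=
            nodup_length_le b (by omega) seen hnd (fun t ht => ⟨(hrep t ht).2.1, (hrep t ht).2.2⟩)
          have hK' : seen'.length ≤ b.toNat + 1 :=
            nodup_length_le b (by omega) seen' (hndf hnd)
              (fun t ht => ⟨(hrep' t ht).2.1, (hrep' t ht).2.2⟩)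
          simp only [List.length_cons] at hfuel
          omega

theorem alt_iff (a : List Int) (ha : ∀ x ∈ a, 1 ≤ x) (b : Int) (hb : 1 ≤ b) :
    (mcnugget_solvable_alt a b = true ↔ NRep a b) := by
  unfold mcnugget_solvable_alt
  rw [if_neg (by omega), if_neg (by omega)]
  constructor
  · intro h
    exact pvBLoop_true a ha b _ _ [0]
      (by intro t ht; simp at ht; subst ht; exact ⟨NRep.zero, le_refl 0, by omega⟩) h
  · intro hrep
    by_contra hne
    rw [Bool.not_eq_true] at hne
    refine pvBLoop_false a ha b hb (b.toNat + 2) (PySem.Set.ofList [0]) [0]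
      (by simp) (by simp [PySem.Set.ofList]) ?_ (by simp [PySem.Set.ofList])
      ?_ (by norm_num [show (PySem.Set.ofList [0] : List Int) = [0] from rfl]; omega) hne hrep
    · intro t ht
      simp [PySem.Set.ofList] at ht
      subst ht
      exact ⟨NRep.zero, le_refl 0, by omega⟩
    · intro t ht hnstk x hx
      exact absurd (by simpa [PySem.Set.ofList] using ht) (by simpa using hnstk)

-- ===== VERDICT (by name: the statements are the Claim_ definitions above) =====
theorem mcnugget_solvable_spec : Claim_unchanged_mcnugget_solvable := by
  intro a b _ hpre hnd
  by_cases hb0 : b = 0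
  · subst hb0
    simp [mcnugget_solvable, mcnugget_solvable_alt]
  · rcases hpre with rfl | ha | hC
    · exact absurd rfl hb0
    · by_cases hbneg : b < 0
      · -- negative target, no size divides it: both programs return false
        have hnodvd : ∀ x ∈ a, ¬ x ∣ b := by
          intro x hx hdvd
          exact hnd ⟨hbneg, x, hx, hdvd⟩
        have hA : mcnugget_solvable a b = false := by
          unfold mcnugget_solvable
          rw [if_neg hb0, if_neg]
          · have hfuel : b.toNat + 1 = 1 := by omega
            rw [hfuel]
            have hofl : PySem.Set.ofList [b] = [b] := rfl
            rw [hofl]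
            simp only [pvALoop, List.length_singleton, PySem.List.max?_id_cons,
              List.foldl_nil, Option.getD_some,
              PySem.Set.remove?_of_mem (List.mem_singleton.mpr rfl)]
            rw [if_neg (by omega)]
            rw [pvAStep_skip a a b _ ha hbneg]
          · simp only [List.any_eq_true, not_exists]
            rintro x ⟨hx, hmod⟩
            rw [beq_iff_eq, PySem.Int.mod_eq_zero_iff_dvd] at hmod
            exact hnodvd x hx hmod
        have hB : mcnugget_solvable_alt a b = false := by
          unfold mcnugget_solvable_alt
          rw [if_pos hbneg]
        rw [hA, hB]
      · have hb : 0 ≤ b := by omega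
        have halt := alt_iff a ha b (by omega)
        unfold mcnugget_solvable
        split_ifs with hdiv
        · rw [List.any_eq_true] at hdiv
          obtain ⟨x, hx, hmod⟩ := hdiv
          have hdvd : x ∣ b := by
            rw [beq_iff_eq] at hmod
            exact (PySem.Int.mod_eq_zero_iff_dvd b x).mp hmod
          exact (halt.mpr (NRep_of_dvd ha hx hdvd hb)).symm
        · have hofl : PySem.Set.ofList [b] = [b] := rfl
          have hloop := pvALoop_iff a ha (b.toNat + 1) (PySem.Set.ofList [b])
            (by rw [hofl]; simp)
            (by rw [hofl]; intro m hm; simp at hm; omega)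
            (by rw [hofl]; intro m hm; simp at hm; omega)
          rw [Bool.eq_iff_iff, halt, hloop, hofl]
          simp
    · -- a divisor of b sits in the zero-free prefix: both sides answer on the first scan
      obtain ⟨x, hxp, hdvd⟩ := hC
      have hx : x ∈ a := List.IsPrefix.mem hxp (List.takeWhile_prefix _)
      have hbneg : ¬ b < 0 := by
        intro hneg
        exact hnd ⟨hneg, x, hx, hdvd⟩
      have hany : (a.any fun x => PySem.Int.mod b x == 0) = true := by
        rw [List.any_eq_true]
        exact ⟨x, hx, by rw [beq_iff_eq]; exact (PySem.Int.mod_eq_zero_iff_dvd b x).mpr hdvd⟩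
      have hA : mcnugget_solvable a b = true := by
        unfold mcnugget_solvable
        rw [if_neg hb0, if_pos hany]
      have hB : mcnugget_solvable_alt a b = true := by
        unfold mcnugget_solvable_alt
        rw [if_neg hbneg, if_neg hb0]
        have hstep : pvBStep a a 0 b (PySem.Set.ofList [0]) [] = none :=
          (pvBStep_none_iff a 0 b a _ _).mpr
            ⟨x, hx, by rw [sub_zero]; rw [PySem.Int.mod_eq_zero_iff_dvd]; exact hdvd⟩
        show pvBLoop a b (b.toNat + 1 + 1) (PySem.Set.ofList [0]) [0] = true
        simp only [pvBLoop, hstep]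
      rw [hA, hB]

theorem mcnugget_solvable_changed : Claim_changed_mcnugget_solvable := by
  unfold Claim_changed_mcnugget_solvable; decide

theorem mcnugget_solvable_tight : Claim_exact_mcnugget_solvable := by
  intro a b _ hpre hd
  obtain ⟨hbneg, x, hx, hdvd⟩ := hd
  have hA : mcnugget_solvable a b = true := by
    unfold mcnugget_solvable
    rw [if_neg (by omega), if_pos]
    rw [List.any_eq_true]
    exact ⟨x, hx, by rw [beq_iff_eq]; exact (PySem.Int.mod_eq_zero_iff_dvd b x).mpr hdvd⟩
  have hB : mcnugget_solvable_alt a b = false := by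
    unfold mcnugget_solvable_alt
    rw [if_pos hbneg]
  rw [hA, hB]
  simp
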